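-- pv_equiv track=rewrite | github.com/shhuan1989/algorithms | codechef/challenge2015/H_ChefAndBalancedString.py | isBalancedString
-- ===== SOURCE A (Python) =====
-- import collections
--
-- def isBalancedString(p, l, r):
--     """
--     根据平衡字符串的定义，如果一个字符串中每个自负出现的次数是偶数，那么这个字符串就是平衡字符串。
--     :param p:
--     :param l:
--     :param r:
--     :return:
--     """
--     if r <= l:
--         return False
--     if (r-l+1) % 2 != 0:
--         return False
--     charCount = collections.defaultdict(int)
--     for i in range(l, r+1):
--         charCount[p[i]] += 1
--     return len(list(filter(lambda x: x%2 != 0, charCount.values()))) == 0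
-- ===== SOURCE B (Python) =====
-- def isBalancedString(p, l, r):
--     if r <= l:
--         return False
--     if (r - l + 1) % 2 != 0:
--         return False
--     s = sorted(p[i] for i in range(l, r + 1))
--     return all(s[2 * k] == s[2 * k + 1] for k in range(len(s) // 2))
-- ===== Notes on version B (the rewrite author's own statement) =====
-- stated objective: alternative
-- what changed: B sorts the selected characters and checks that consecutive pairs s[2k]==s[2k+1] are equal (a balanced multiset is exactly one whose sorted arrangement pairs up), replacing A's defaultdict of full character counts and the final filter-for-odd-values pass.
import Mathlib
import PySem

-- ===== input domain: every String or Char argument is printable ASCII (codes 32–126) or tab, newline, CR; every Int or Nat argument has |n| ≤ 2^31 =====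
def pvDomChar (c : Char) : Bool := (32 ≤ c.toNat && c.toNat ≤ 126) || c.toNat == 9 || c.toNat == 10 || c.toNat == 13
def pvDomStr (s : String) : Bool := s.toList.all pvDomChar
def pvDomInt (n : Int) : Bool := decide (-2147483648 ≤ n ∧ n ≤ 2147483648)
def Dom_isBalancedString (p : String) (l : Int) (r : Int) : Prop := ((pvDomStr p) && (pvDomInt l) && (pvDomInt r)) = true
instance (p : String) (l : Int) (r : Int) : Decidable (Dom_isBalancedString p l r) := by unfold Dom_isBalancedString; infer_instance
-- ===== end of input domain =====

-- B sorts the selected characters and checks adjacent pairs are equal, instead of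
-- A's dict of full character counts followed by a filter-for-odd-values pass.

-- ===== PORT A =====
-- p[i] (possibly negative index, Python wraparound) is exact via PySem.Str.pyGet?;
-- the default ' ' is never reached on Pre_ inputs.
def isBalancedString (p : String) (l : Int) (r : Int) : Bool :=
  if r ≤ l then false
  else if PySem.Int.mod (r - l + 1) 2 ≠ 0 then false
  else
    let charCount : PySem.Dict Char Int :=
      (PySem.List.pyRange l (r + 1) 1).foldl
        (fun d i =>
          let c := (PySem.Str.pyGet? p i).getD ' '
          d.insert c (d.getD c 0 + 1))
        PySem.Dict.empty
    (charCount.values.filter (fun x => PySem.Int.mod x 2 ≠ 0)).length == 0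

-- ===== PORT B =====
def isBalancedString_alt (p : String) (l : Int) (r : Int) : Bool :=
  if r ≤ l then false
  else if PySem.Int.mod (r - l + 1) 2 ≠ 0 then false
  else
    let s := PySem.List.sorted
      ((PySem.List.pyRange l (r + 1) 1).map (fun i => (PySem.Str.pyGet? p i).getD ' '))
      (fun c => c) false
    (PySem.List.pyRange 0 (PySem.Int.floordiv (s.length : Int) 2) 1).all
      (fun k => ((PySem.List.pyGet? s (2 * k)).getD ' ') == ((PySem.List.pyGet? s (2 * k + 1)).getD ' '))

-- ===== PRECONDITION & SPEC =====
-- Pre_ excludes exactly the inputs where A raises IndexError: both guards pass (so the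
-- loop runs) and some accessed index l..r falls outside Python's valid index range for p.
def Pre_isBalancedString (p : String) (l : Int) (r : Int) : Prop :=
  l < r → PySem.Int.mod (r - l + 1) 2 = 0 →
    (-(p.toList.length : Int) ≤ l ∧ r < (p.toList.length : Int))
instance (p : String) (l : Int) (r : Int) : Decidable (Pre_isBalancedString p l r) := by
  unfold Pre_isBalancedString; infer_instance

def pvWitness_isBalancedString : String × Int × Int := ("abab", 0, 3)

def Spec_isBalancedString (p : String) (l : Int) (r : Int) (out : Bool) : Prop := out = isBalancedString_alt p l r
instance (p : String) (l : Int) (r : Int) (out : Bool) : Decidable (Spec_isBalancedString p l r out) := by unfold Spec_isBalancedString; infer_instance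

-- ===== CLAIM (what is proved, stated in full; the proofs are below) =====
def Claim_equal_isBalancedString : Prop := ∀ (p : String) (l : Int) (r : Int), Dom_isBalancedString p l r → Pre_isBalancedString p l r → Spec_isBalancedString p l r (isBalancedString p l r)

-- ===== LEMMAS AND PROOFS =====

-- B's pairwise check, structurally: consume the sorted list two elements at a time.
def pvPairOK : List Char → Bool
  | [] => true
  | [_] => false
  | a :: b :: t => (a == b) && pvPairOK t

-- The index-based all() over range(len(s)//2) is the structural pair scan (even length).
theorem pvAll_pairs_eq_pairOK (s : List Char) (h : s.length % 2 = 0) :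
    ((List.range (s.length / 2)).all
      (fun k => (s[2 * k]?.getD ' ') == (s[2 * k + 1]?.getD ' '))) = pvPairOK s := by
  induction s using pvPairOK.induct with
  | case1 => simp [pvPairOK]
  | case2 a => simp at h
  | case3 a b t ih =>
      have hlen : (a :: b :: t).length / 2 = t.length / 2 + 1 := by
        simp [List.length_cons]; omega
      rw [hlen, List.range_succ_eq_map]
      simp only [List.all_cons, List.all_map]
      have ht : t.length % 2 = 0 := by simp [List.length_cons] at h; omega
      have hmap : ((fun k => ((a :: b :: t)[2 * k]?.getD ' ') == ((a :: b :: t)[2 * k + 1]?.getD ' ')) ∘ Nat.succ)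
          = (fun k => (t[2 * k]?.getD ' ') == (t[2 * k + 1]?.getD ' ')) := by
        funext k
        have e1 : 2 * Nat.succ k = 2 * k + 1 + 1 := by omega
        have e2 : 2 * Nat.succ k + 1 = 2 * k + 1 + 1 + 1 := by omega
        simp [Function.comp, e1]
      rw [hmap, ih ht]
      simp [pvPairOK]

-- On a sorted list, the pair scan succeeds iff every character count is even.
theorem pvPairOK_iff_counts_even (s : List Char) (hs : s.Pairwise (· ≤ ·)) :
    pvPairOK s = true ↔ ∀ c : Char, s.count c % 2 = 0 := by
  induction s using pvPairOK.induct with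
  | case1 => simp [pvPairOK]
  | case2 a =>
      simp only [pvPairOK]
      constructor
      · intro h; cases h
      · intro h
        have := h a
        simp at this
  | case3 a b t ih =>
      have hab : a ≤ b := (List.pairwise_cons.mp hs).1 b (by simp)
      have ht2 : (b :: t).Pairwise (· ≤ ·) := (List.pairwise_cons.mp hs).2
      have ht : t.Pairwise (· ≤ ·) := (List.pairwise_cons.mp ht2).2
      simp only [pvPairOK, Bool.and_eq_true, beq_iff_eq]
      constructor
      · rintro ⟨rfl, hp⟩ c
        have hcc := (ih ht).mp hp c
        simp only [List.count_cons]
        omega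
      · intro h
        have hba : b = a := by
          have ha := h a
          have ha1 : a ∈ b :: t := by
            by_contra hmem
            have h0 : (b :: t).count a = 0 := List.count_eq_zero.mpr hmem
            simp only [List.count_cons_self, h0] at ha
            omega
          rcases List.mem_cons.mp ha1 with hh | hh
          · exact hh.symm
          · exact le_antisymm ((List.pairwise_cons.mp ht2).1 a hh) hab
        subst hba
        refine ⟨rfl, (ih ht).mpr ?_⟩
        intro c
        have hcc := h c
        simp only [List.count_cons] at hcc ⊢
        omega

-- A's count-dict-then-filter check, characterised as "every character count is even".
theorem pvCounter_filter_odd (cs : List Char) :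
    ((((cs.foldl (fun d c => d.insert c (d.getD c 0 + 1)) PySem.Dict.empty).values).filter
        (fun x => PySem.Int.mod x 2 ≠ 0)).length = 0)
    ↔ ∀ c : Char, cs.count c % 2 = 0 := by
  rw [PySem.Dict.foldl_insert_getD_add_one_eq_counter]
  simp only [PySem.Dict.values, PySem.Dict.items_counter, List.map_map]
  rw [List.length_eq_zero_iff, List.filter_eq_nil_iff]
  constructor
  · intro h c
    by_cases hc : c ∈ cs
    · have := h ((cs.count c : Int)) (by
        simp only [List.mem_map, Function.comp]
        exact ⟨c, by rwa [PySem.Set.mem_ofList], rfl⟩)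
      simp only [PySem.Int.mod_eq_emod_of_pos (by norm_num : (0:Int) < 2)] at this
      simp at this
      omega
    · simp [List.count_eq_zero.mpr hc]
  · intro h x hx
    simp only [List.mem_map, Function.comp] at hx
    obtain ⟨c, _, rfl⟩ := hx
    simp only [PySem.Int.mod_eq_emod_of_pos (by norm_num : (0:Int) < 2)]
    have := h c
    simp
    omega

-- ===== VERDICT (by name: the statement is the Claim_ definition above) =====
theorem isBalancedString_spec : Claim_equal_isBalancedString := by
  intro p l r _ _
  unfold Spec_isBalancedString isBalancedString isBalancedString_alt
  split_ifs with h1 h2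
  · rfl
  · rfl
  · -- both guards passed: l < r and (r-l+1) % 2 = 0
    set cs : List Char :=
      (PySem.List.pyRange l (r + 1) 1).map (fun i => (PySem.Str.pyGet? p i).getD ' ') with hcs
    set s : List Char := PySem.List.sorted cs (fun c => c) false with hsdef
    -- A side = counts-even
    have hA : (PySem.List.pyRange l (r + 1) 1).foldl
        (fun (d : PySem.Dict Char Int) i =>
          d.insert ((PySem.Str.pyGet? p i).getD ' ')
            (d.getD ((PySem.Str.pyGet? p i).getD ' ') 0 + 1)) PySem.Dict.empty
        = cs.foldl (fun d c => d.insert c (d.getD c 0 + 1)) PySem.Dict.empty :=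
      (List.foldl_map (f := fun i => (PySem.Str.pyGet? p i).getD ' ')
        (g := fun (d : PySem.Dict Char Int) c => d.insert c (d.getD c 0 + 1))
        (l := PySem.List.pyRange l (r + 1) 1) (init := PySem.Dict.empty)).symm
    -- lengths and evenness
    have hlen : cs.length = (r + 1 - l).toNat := by
      simp [hcs, PySem.List.length_pyRange_one]
    have hslen : s.length = cs.length := by
      exact (PySem.List.sorted_perm cs (fun c => c) false).length_eq
    have heven : s.length % 2 = 0 := by
      rw [hslen, hlen]
      rw [PySem.Int.mod_eq_emod_of_pos (by norm_num : (0:Int) < 2)] at h2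
      omega
    -- B side: reduce the pyRange/pyGet? scan to the Nat-indexed all
    have hB : ((PySem.List.pyRange 0 (PySem.Int.floordiv (s.length : Int) 2) 1).all
        (fun k => ((PySem.List.pyGet? s (2 * k)).getD ' ') == ((PySem.List.pyGet? s (2 * k + 1)).getD ' ')))
        = ((List.range (s.length / 2)).all
            (fun k => (s[2 * k]?.getD ' ') == (s[2 * k + 1]?.getD ' '))) := by
      have hfd : PySem.Int.floordiv (s.length : Int) 2 = ((s.length / 2 : Nat) : Int) := by
        exact_mod_cast PySem.Int.floordiv_natCast s.length 2
      rw [hfd, PySem.List.pyRange_zero_natCast, List.all_map]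
      congr 1
      funext k
      have e1 : (2 * (k : Int)) = ((2 * k : Nat) : Int) := by push_cast; ring
      have e2 : ((2 * k : Nat) : Int) + 1 = ((2 * k + 1 : Nat) : Int) := by push_cast; ring
      simp only [Function.comp, e1, e2, PySem.List.pyGet?_natCast]
    have hsp : s.Pairwise (· ≤ ·) := PySem.List.sorted_pairwise cs (fun c => c)
    have hcnt : ∀ c : Char, s.count c = cs.count c :=
      fun c => (PySem.List.sorted_perm cs (fun c => c) false).count_eq c
    rw [Bool.eq_iff_iff]
    simp only [beq_iff_eq, hA, hB]
    have e3 : ((List.range (s.length / 2)).all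
          (fun k => (s[2 * k]?.getD ' ') == (s[2 * k + 1]?.getD ' ')) = true)
        ↔ ∀ c : Char, cs.count c % 2 = 0 := by
      rw [pvAll_pairs_eq_pairOK s heven, pvPairOK_iff_counts_even s hsp]
      constructor <;> intro h c <;> [rw [← hcnt c]; rw [hcnt c]] <;> exact h c
    exact (pvCounter_filter_odd cs).trans e3.symm
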